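-- pv_equiv track=rewrite | github.com/jyotipokhrel22/research_agent | app/analysis/comparator.py | _build_method_clusters
-- ===== SOURCE A (Python) =====
-- from typing import Any, Dict, Iterable, List
--
-- def _build_method_clusters(method_distribution: Dict[str, int]) -> Dict[str, int]:
--     clusters = {
--         "transformer": {"transformer", "bert", "gpt", "vit"},
--         "reinforcement_learning": {"rl", "reinforcement", "policy", "qlearning"},
--         "graph": {"graph", "gnn", "gcn"},
--         "diffusion": {"diffusion"},
--     }
--
--     cluster_counts: Dict[str, int] = {}
--     for method, count in method_distribution.items():
--         matched = False
--         for cluster_name, keywords in clusters.items():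
--             if method in keywords:
--                 cluster_counts[cluster_name] = cluster_counts.get(cluster_name, 0) + count
--                 matched = True
--                 break
--         if not matched:
--             cluster_counts["other"] = cluster_counts.get("other", 0) + count
--
--     return dict(sorted(cluster_counts.items()))
-- ===== SOURCE B (Python) =====
-- def _build_method_clusters(method_distribution):
--     keywords = {
--         "transformer": {"transformer", "bert", "gpt", "vit"},
--         "reinforcement_learning": {"rl", "reinforcement", "policy", "qlearning"},
--         "graph": {"graph", "gnn", "gcn"},
--         "diffusion": {"diffusion"},
--     }
--     known = {kw for kws in keywords.values() for kw in kws}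
--     result = {}
--     for name in sorted(list(keywords) + ["other"]):
--         kws = keywords.get(name)
--         counts = [c for m, c in method_distribution.items()
--                   if (m not in known if kws is None else m in kws)]
--         if counts:
--             result[name] = sum(counts)
--     return result
-- ===== Notes on version B (the rewrite author's own statement) =====
-- stated objective: alternative
-- what changed: Instead of A's per-method loop with an inner first-match keyword scan, an accumulator dict and a final sort, B iterates over the cluster names in sorted order and computes each cluster's total with one filtered pass over the distribution, building the output directly in sorted order with no matched flag, no inner break and no final sort; this is exact because the keyword sets are pairwise disjoint.
import Mathlib
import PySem

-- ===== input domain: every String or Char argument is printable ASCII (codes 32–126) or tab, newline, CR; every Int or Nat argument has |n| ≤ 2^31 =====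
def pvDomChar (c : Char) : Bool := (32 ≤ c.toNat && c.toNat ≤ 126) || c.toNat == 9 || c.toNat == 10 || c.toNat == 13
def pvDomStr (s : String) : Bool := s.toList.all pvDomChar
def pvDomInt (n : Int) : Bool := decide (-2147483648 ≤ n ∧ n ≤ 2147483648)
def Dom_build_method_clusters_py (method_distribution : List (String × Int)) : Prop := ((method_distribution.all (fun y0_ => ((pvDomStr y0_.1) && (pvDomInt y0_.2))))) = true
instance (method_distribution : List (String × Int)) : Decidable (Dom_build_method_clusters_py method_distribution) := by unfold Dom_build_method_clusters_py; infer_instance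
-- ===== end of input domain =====

-- B aggregates per cluster instead of per method: one filtered pass per cluster name,
-- visiting the names in sorted order, so the output is built directly in order and
-- A's inner first-match scan, matched flag, accumulator dict and final sort all disappear.

-- ===== PORT A =====
def pvClustersA : List (String × PySem.Set String) :=
  [("transformer", PySem.Set.ofList ["transformer", "bert", "gpt", "vit"]),
   ("reinforcement_learning", PySem.Set.ofList ["rl", "reinforcement", "policy", "qlearning"]),
   ("graph", PySem.Set.ofList ["graph", "gnn", "gcn"]),
   ("diffusion", PySem.Set.ofList ["diffusion"])]

-- inner 'for cluster_name, keywords in clusters.items(): … break' loop: first matching cluster name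
def pvFindClusterA (method : String) : List (String × PySem.Set String) → Option String
  | [] => none
  | (name, kws) :: rest =>
      if PySem.Set.contains kws method then some name else pvFindClusterA method rest

def build_method_clusters_py (method_distribution : List (String × Int)) : List (String × Int) :=
  let cluster_counts : PySem.Dict String Int :=
    method_distribution.foldl
      (fun cc p =>
        match pvFindClusterA p.1 pvClustersA with
        | some cluster_name => cc.insert cluster_name (cc.getD cluster_name 0 + p.2)
        | none => cc.insert "other" (cc.getD "other" 0 + p.2))
      PySem.Dict.empty
  PySem.List.sorted2 cluster_counts.items (fun x => x.1) (fun x => x.2)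

-- ===== PORT B =====
def pvKeywordsB : PySem.Dict String (PySem.Set String) :=
  PySem.Dict.ofList
    [("transformer", PySem.Set.ofList ["transformer", "bert", "gpt", "vit"]),
     ("reinforcement_learning", PySem.Set.ofList ["rl", "reinforcement", "policy", "qlearning"]),
     ("graph", PySem.Set.ofList ["graph", "gnn", "gcn"]),
     ("diffusion", PySem.Set.ofList ["diffusion"])]

-- known = {kw for kws in keywords.values() for kw in kws}
def pvKnownB : PySem.Set String :=
  pvKeywordsB.values.foldl (fun s kws => PySem.Set.update s kws) PySem.Set.empty

def build_method_clusters_py_alt (method_distribution : List (String × Int)) : List (String × Int) :=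
  let result : PySem.Dict String Int :=
    (PySem.List.sorted (pvKeywordsB.keys ++ ["other"]) (fun x => x) false).foldl
      (fun result name =>
        let counts : List Int :=
          (method_distribution.filter (fun p =>
            match pvKeywordsB.get? name with
            | none => !(PySem.Set.contains pvKnownB p.1)
            | some kws => PySem.Set.contains kws p.1)).map (fun p => p.2)
        if counts = [] then result else result.insert name counts.sum)
      PySem.Dict.empty
  result.items

-- ===== PRECONDITION & SPEC =====
def Spec_build_method_clusters_py (method_distribution : List (String × Int)) (out : List (String × Int)) : Prop := out = build_method_clusters_py_alt method_distribution
instance (method_distribution : List (String × Int)) (out : List (String × Int)) : Decidable (Spec_build_method_clusters_py method_distribution out) := by unfold Spec_build_method_clusters_py; infer_instance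

-- ===== CLAIM (what is proved, stated in full; the proofs are below) =====
def Claim_equal_build_method_clusters_py : Prop := ∀ (method_distribution : List (String × Int)), Dom_build_method_clusters_py method_distribution → Spec_build_method_clusters_py method_distribution (build_method_clusters_py method_distribution)

-- ===== LEMMAS AND PROOFS =====

-- the cluster name A's inner scan assigns to a method ("other" if no keyword set matches)
def pvTargetOf (m : String) : String :=
  match pvFindClusterA m pvClustersA with
  | some n => n
  | none => "other"

-- the five possible cluster names, in sorted order
def pvFive : List String :=
  ["diffusion", "graph", "other", "reinforcement_learning", "transformer"]

-- counts of the methods assigned to cluster k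
def pvGrp (md : List (String × Int)) (k : String) : List Int :=
  (md.filter (fun p => pvTargetOf p.1 == k)).map (fun p => p.2)

-- the canonical result: nonempty clusters in sorted name order, with their sums
def pvC (md : List (String × Int)) : List (String × Int) :=
  (pvFive.filter (fun n => decide (pvGrp md n ≠ []))).map (fun n => (n, (pvGrp md n).sum))

-- A's per-method update, phrased with pvTargetOf
def pvStepT (cc : PySem.Dict String Int) (p : String × Int) : PySem.Dict String Int :=
  cc.insert (pvTargetOf p.1) (cc.getD (pvTargetOf p.1) 0 + p.2)

-- Python's tuple-lexicographic strict order on (String, Int) pairs (sorted2's comparator)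
def pvLexLt (a b : String × Int) : Bool :=
  decide (a.1 < b.1) || (!decide (b.1 < a.1) && decide (a.2 < b.2))

def pvLe (a b : String × Int) : Prop := pvLexLt b a = false

lemma pvLexLt_true_iff (a b : String × Int) :
    pvLexLt a b = true ↔ (a.1 < b.1 ∨ (¬ b.1 < a.1 ∧ a.2 < b.2)) := by
  simp [pvLexLt]

lemma pvLexLt_false_iff (a b : String × Int) :
    pvLexLt a b = false ↔ (¬ a.1 < b.1 ∧ (b.1 < a.1 ∨ ¬ a.2 < b.2)) := by
  rw [← Bool.not_eq_true, pvLexLt_true_iff]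
  tauto

lemma pv_asymm {a b : String × Int} (h : pvLexLt a b = true) : pvLexLt b a = false := by
  rw [pvLexLt_true_iff] at h
  rw [pvLexLt_false_iff]
  rcases h with h | ⟨h1, h2⟩
  · exact ⟨lt_asymm h, Or.inl h⟩
  · exact ⟨h1, Or.inr (lt_asymm h2)⟩

lemma pv_lt_trans {a b c : String × Int} (h1 : pvLexLt a b = true) (h2 : pvLexLt b c = true) :
    pvLexLt a c = true := by
  rw [pvLexLt_true_iff] at h1 h2 ⊢
  rcases h1 with h1 | ⟨h1, h1'⟩ <;> rcases h2 with h2 | ⟨h2, h2'⟩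
  · exact Or.inl (lt_trans h1 h2)
  · exact Or.inl (lt_of_lt_of_le h1 (not_lt.mp h2))
  · exact Or.inl (lt_of_le_of_lt (not_lt.mp h1) h2)
  · exact Or.inr ⟨fun hc => h1 (lt_of_le_of_lt (not_lt.mp h2) hc), lt_trans h1' h2'⟩

lemma pv_antisymm {a b : String × Int} (h1 : pvLexLt a b = false) (h2 : pvLexLt b a = false) :
    a = b := by
  rw [pvLexLt_false_iff] at h1 h2
  have hf : a.1 = b.1 := le_antisymm (not_lt.mp h2.1) (not_lt.mp h1.1)
  have hs : a.2 = b.2 := by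
    rcases h1.2 with h | h
    · exact absurd h h2.1
    · rcases h2.2 with h' | h'
      · exact absurd h' h1.1
      · exact le_antisymm (not_lt.mp h') (not_lt.mp h)
  exact Prod.ext hf hs

lemma pv_pairwise_insertBy (x : String × Int) :
    ∀ ys : List (String × Int), ys.Pairwise pvLe →
      (PySem.List.insertBy pvLexLt x ys).Pairwise pvLe
  | [], _ => by simp [PySem.List.insertBy, pvLe]
  | y :: ys, h => by
    rw [List.pairwise_cons] at h
    obtain ⟨hy, hys⟩ := h
    by_cases hb : pvLexLt x y = true
    · rw [show PySem.List.insertBy pvLexLt x (y :: ys) = x :: y :: ys by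
        simp [PySem.List.insertBy, hb]]
      rw [List.pairwise_cons]
      refine ⟨?_, List.pairwise_cons.mpr ⟨hy, hys⟩⟩
      intro z hz
      rcases List.mem_cons.mp hz with rfl | hz
      · exact pv_asymm hb
      · have hzy := hy z hz
        unfold pvLe at *
        by_contra hzx
        rw [Bool.not_eq_false] at hzx
        exact absurd (pv_lt_trans hzx hb) (by rw [hzy]; simp)
    · rw [Bool.not_eq_true] at hb
      rw [show PySem.List.insertBy pvLexLt x (y :: ys) = y :: PySem.List.insertBy pvLexLt x ys by
        simp [PySem.List.insertBy, hb]]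
      rw [List.pairwise_cons]
      refine ⟨?_, pv_pairwise_insertBy x ys hys⟩
      intro z hz
      rw [PySem.List.mem_insertBy] at hz
      rcases hz with rfl | hz
      · exact hb
      · exact hy z hz

lemma pv_foldl_insertBy_pairwise :
    ∀ (xs acc : List (String × Int)), acc.Pairwise pvLe →
      (xs.foldl (fun a x => PySem.List.insertBy pvLexLt x a) acc).Pairwise pvLe
  | [], _, h => h
  | x :: xs, acc, h =>
      pv_foldl_insertBy_pairwise xs _ (pv_pairwise_insertBy x acc h)

-- any strictly key-increasing rearrangement names the sorted2 order
lemma pv_sorted2_eq (xs ys : List (String × Int)) (hp : ys.Perm xs)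
    (ho : ys.Pairwise pvLe) :
    PySem.List.sorted2 xs (fun x => x.1) (fun x => x.2) = ys := by
  have hdef : PySem.List.sorted2 xs (fun x : String × Int => x.1) (fun x => x.2)
      = xs.foldl (fun a x => PySem.List.insertBy pvLexLt x a) [] := rfl
  have hs : (PySem.List.sorted2 xs (fun x : String × Int => x.1) (fun x => x.2)).Pairwise pvLe := by
    rw [hdef]; exact pv_foldl_insertBy_pairwise xs [] (by simp)
  have hperm : (PySem.List.sorted2 xs (fun x : String × Int => x.1) (fun x => x.2)).Perm ys :=
    (PySem.List.sorted2_perm xs (fun x => x.1) (fun x => x.2) false).trans hp.symm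
  exact List.eq_of_perm_of_sorted (fun a b _ _ h1 h2 => pv_antisymm h2 h1) hs ho hperm

-- A's raw step equals the pvTargetOf-phrased step
lemma pv_stepA_eq :
    (fun (cc : PySem.Dict String Int) (p : String × Int) =>
        match pvFindClusterA p.1 pvClustersA with
        | some cluster_name => cc.insert cluster_name (cc.getD cluster_name 0 + p.2)
        | none => cc.insert "other" (cc.getD "other" 0 + p.2))
      = pvStepT := by
  funext cc p
  unfold pvStepT pvTargetOf
  cases h : pvFindClusterA p.1 pvClustersA <;> simp [h]

lemma pv_grp_append (md : List (String × Int)) (p : String × Int) (k : String) :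
    pvGrp (md ++ [p]) k
      = pvGrp md k ++ (if pvTargetOf p.1 == k then [p.2] else []) := by
  unfold pvGrp
  rw [List.filter_append, List.map_append]
  congr 1
  by_cases h : (pvTargetOf p.1 == k) = true <;> simp [List.filter, h]

lemma pv_get?_fold (md : List (String × Int)) (k : String) :
    (md.foldl pvStepT PySem.Dict.empty).get? k
      = if pvGrp md k = [] then none else some (pvGrp md k).sum := by
  induction md using List.reverseRecOn with
  | nil => simp [pvGrp, PySem.Dict.get?_empty]
  | append_singleton md p ih =>
    rw [List.foldl_append, List.foldl_cons, List.foldl_nil]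
    rw [pv_grp_append]
    by_cases hk : k = pvTargetOf p.1
    · rw [show pvStepT (md.foldl pvStepT PySem.Dict.empty) p
          = (md.foldl pvStepT PySem.Dict.empty).insert (pvTargetOf p.1)
              ((md.foldl pvStepT PySem.Dict.empty).getD (pvTargetOf p.1) 0 + p.2) from rfl]
      rw [← hk]
      rw [PySem.Dict.get?_insert_self]
      rw [PySem.Dict.getD_eq_get?_getD, ih]
      by_cases h0 : pvGrp md k = [] <;> simp [h0]
    · rw [show pvStepT (md.foldl pvStepT PySem.Dict.empty) p
          = (md.foldl pvStepT PySem.Dict.empty).insert (pvTargetOf p.1)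
              ((md.foldl pvStepT PySem.Dict.empty).getD (pvTargetOf p.1) 0 + p.2) from rfl]
      rw [PySem.Dict.get?_insert_of_ne _ _ hk, ih]
      have hbe : (pvTargetOf p.1 == k) = false := beq_eq_false_iff_ne.mpr (Ne.symm hk)
      simp [hbe]

lemma pv_keys_nodup (md : List (String × Int)) :
    (md.foldl pvStepT PySem.Dict.empty).keys.Nodup := by
  have : (md.foldl pvStepT PySem.Dict.empty)
      = md.foldl (fun d p => d.insert (pvTargetOf p.1) (d.getD (pvTargetOf p.1) 0 + p.2))
          PySem.Dict.empty := rfl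
  rw [this]
  exact PySem.Dict.nodup_keys_foldl_insert_key md (fun p => pvTargetOf p.1)
    (fun d p => d.getD (pvTargetOf p.1) 0 + p.2) PySem.Dict.empty (by simp)

lemma pv_target_mem (m : String) : pvTargetOf m ∈ pvFive := by
  unfold pvTargetOf pvFive
  simp only [pvClustersA, pvFindClusterA]
  split_ifs <;> simp

-- all five comparisons between B's keyword tests and A's assigned cluster, at once
lemma pv_tgt (m : String) :
    PySem.Set.contains (PySem.Set.ofList ["transformer", "bert", "gpt", "vit"]) m
        = (pvTargetOf m == "transformer")
  ∧ PySem.Set.contains (PySem.Set.ofList ["rl", "reinforcement", "policy", "qlearning"]) m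
        = (pvTargetOf m == "reinforcement_learning")
  ∧ PySem.Set.contains (PySem.Set.ofList ["graph", "gnn", "gcn"]) m
        = (pvTargetOf m == "graph")
  ∧ PySem.Set.contains (PySem.Set.ofList ["diffusion"]) m
        = (pvTargetOf m == "diffusion")
  ∧ (!PySem.Set.contains pvKnownB m) = (pvTargetOf m == "other") := by
  by_cases h1 : m = "transformer"
  · subst h1; decide
  by_cases h2 : m = "bert"
  · subst h2; decide
  by_cases h3 : m = "gpt"
  · subst h3; decide
  by_cases h4 : m = "vit"
  · subst h4; decide
  by_cases h5 : m = "rl"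
  · subst h5; decide
  by_cases h6 : m = "reinforcement"
  · subst h6; decide
  by_cases h7 : m = "policy"
  · subst h7; decide
  by_cases h8 : m = "qlearning"
  · subst h8; decide
  by_cases h9 : m = "graph"
  · subst h9; decide
  by_cases h10 : m = "gnn"
  · subst h10; decide
  by_cases h11 : m = "gcn"
  · subst h11; decide
  by_cases h12 : m = "diffusion"
  · subst h12; decide
  have g1 : ("transformer" == m) = false := beq_eq_false_iff_ne.mpr (Ne.symm h1)
  have g2 : ("bert" == m) = false := beq_eq_false_iff_ne.mpr (Ne.symm h2)
  have g3 : ("gpt" == m) = false := beq_eq_false_iff_ne.mpr (Ne.symm h3)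
  have g4 : ("vit" == m) = false := beq_eq_false_iff_ne.mpr (Ne.symm h4)
  have g5 : ("rl" == m) = false := beq_eq_false_iff_ne.mpr (Ne.symm h5)
  have g6 : ("reinforcement" == m) = false := beq_eq_false_iff_ne.mpr (Ne.symm h6)
  have g7 : ("policy" == m) = false := beq_eq_false_iff_ne.mpr (Ne.symm h7)
  have g8 : ("qlearning" == m) = false := beq_eq_false_iff_ne.mpr (Ne.symm h8)
  have g9 : ("graph" == m) = false := beq_eq_false_iff_ne.mpr (Ne.symm h9)
  have g10 : ("gnn" == m) = false := beq_eq_false_iff_ne.mpr (Ne.symm h10)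
  have g11 : ("gcn" == m) = false := beq_eq_false_iff_ne.mpr (Ne.symm h11)
  have g12 : ("diffusion" == m) = false := beq_eq_false_iff_ne.mpr (Ne.symm h12)
  have hK : pvKnownB = ["transformer", "bert", "gpt", "vit", "rl", "reinforcement",
      "policy", "qlearning", "graph", "gnn", "gcn", "diffusion"] := rfl
  unfold pvTargetOf
  simp [pvFindClusterA, pvClustersA, PySem.Set.contains, PySem.Set.ofList, hK,
    g1, g2, g3, g4, g5, g6, g7, g8, g9, g10, g11, g12,
    h1, h2, h3, h4, h5, h6, h7, h8, h9, h10, h11, h12]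

-- the conditional-insert loop over fresh distinct names appends exactly the nonempty groups
lemma pv_items_loop :
    ∀ (names : List String) (d : PySem.Dict String Int) (g : String → List Int),
      names.Nodup → (∀ n ∈ names, d.contains n = false) →
      (names.foldl (fun r n => if g n = [] then r else r.insert n (g n).sum) d).items
        = d.items ++ (names.filter (fun n => decide (g n ≠ []))).map (fun n => (n, (g n).sum))
  | [], d, g, _, _ => by simp
  | n :: names, d, g, hnd, hc => by
    rw [List.nodup_cons] at hnd
    rw [List.foldl_cons]
    by_cases h0 : g n = []
    · rw [if_pos h0]
      rw [pv_items_loop names d g hnd.2 (fun m hm => hc m (List.mem_cons_of_mem n hm))]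
      simp [h0]
    · rw [if_neg h0]
      have hcn : d.contains n = false := hc n (List.mem_cons_self)
      have hrest : ∀ m ∈ names, (d.insert n (g n).sum).contains m = false := by
        intro m hm
        rw [PySem.Dict.contains_insert]
        have : (m == n) = false := beq_eq_false_iff_ne.mpr (fun he => hnd.1 (he ▸ hm))
        simp [this, hc m (List.mem_cons_of_mem n hm)]
      rw [pv_items_loop names _ g hnd.2 hrest]
      rw [PySem.Dict.items_insert_of_not_contains _ _ hcn]
      simp [h0]

-- B's sorted(list(keywords) + ["other"]) is the five names in order
lemma pv_sortedNames :
    PySem.List.sorted (pvKeywordsB.keys ++ ["other"]) (fun x => x) false = pvFive := by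
  have hk : pvKeywordsB.keys = ["transformer", "reinforcement_learning", "graph", "diffusion"] :=
    rfl
  rw [hk]
  simp [PySem.List.sorted, PySem.List.insertBy, pvFive]
  decide

-- B's fold computes the canonical result
lemma pv_alt_eq_C (md : List (String × Int)) :
    build_method_clusters_py_alt md = pvC md := by
  unfold build_method_clusters_py_alt
  rw [pv_sortedNames]
  show (pvFive.foldl
      (fun (result : PySem.Dict String Int) (name : String) =>
        let counts : List Int :=
          (md.filter (fun p =>
            match pvKeywordsB.get? name with
            | none => !(PySem.Set.contains pvKnownB p.1)
            | some kws => PySem.Set.contains kws p.1)).map (fun p => p.2)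
        if counts = [] then result else result.insert name counts.sum)
      PySem.Dict.empty).items = pvC md
  have hstep : ∀ n ∈ pvFive, ∀ r : PySem.Dict String Int,
      (fun (result : PySem.Dict String Int) (name : String) =>
        let counts : List Int :=
          (md.filter (fun p =>
            match pvKeywordsB.get? name with
            | none => !(PySem.Set.contains pvKnownB p.1)
            | some kws => PySem.Set.contains kws p.1)).map (fun p => p.2)
        if counts = [] then result else result.insert name counts.sum) r n
      = (fun (r : PySem.Dict String Int) (n : String) =>
          if pvGrp md n = [] then r else r.insert n (pvGrp md n).sum) r n := by
    intro n hn r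
    have hfilter : (md.filter (fun p =>
        match pvKeywordsB.get? n with
        | none => !(PySem.Set.contains pvKnownB p.1)
        | some kws => PySem.Set.contains kws p.1)).map (fun p => p.2) = pvGrp md n := by
      unfold pvGrp
      congr 1
      apply List.filter_congr
      intro p _
      have ht := pv_tgt p.1
      fin_cases hn
      · show PySem.Set.contains (PySem.Set.ofList ["diffusion"]) p.1
            = (pvTargetOf p.1 == "diffusion")
        exact ht.2.2.2.1
      · show PySem.Set.contains (PySem.Set.ofList ["graph", "gnn", "gcn"]) p.1
            = (pvTargetOf p.1 == "graph")
        exact ht.2.2.1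
      · show (!PySem.Set.contains pvKnownB p.1) = (pvTargetOf p.1 == "other")
        exact ht.2.2.2.2
      · show PySem.Set.contains
            (PySem.Set.ofList ["rl", "reinforcement", "policy", "qlearning"]) p.1
            = (pvTargetOf p.1 == "reinforcement_learning")
        exact ht.2.1
      · show PySem.Set.contains
            (PySem.Set.ofList ["transformer", "bert", "gpt", "vit"]) p.1
            = (pvTargetOf p.1 == "transformer")
        exact ht.1
    show (if (md.filter (fun p =>
            match pvKeywordsB.get? n with
            | none => !(PySem.Set.contains pvKnownB p.1)
            | some kws => PySem.Set.contains kws p.1)).map (fun p => p.2) = []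
          then r
          else r.insert n ((md.filter (fun p =>
            match pvKeywordsB.get? n with
            | none => !(PySem.Set.contains pvKnownB p.1)
            | some kws => PySem.Set.contains kws p.1)).map (fun p => p.2)).sum)
        = (if pvGrp md n = [] then r else r.insert n (pvGrp md n).sum)
    rw [hfilter]
  have hfold : List.foldl
      (fun (result : PySem.Dict String Int) (name : String) =>
        let counts : List Int :=
          (md.filter (fun p =>
            match pvKeywordsB.get? name with
            | none => !(PySem.Set.contains pvKnownB p.1)
            | some kws => PySem.Set.contains kws p.1)).map (fun p => p.2)
        if counts = [] then result else result.insert name counts.sum)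
      PySem.Dict.empty pvFive
      = List.foldl
        (fun (r : PySem.Dict String Int) (n : String) =>
          if pvGrp md n = [] then r else r.insert n (pvGrp md n).sum)
        PySem.Dict.empty pvFive :=
    PySem.List.foldl_congr_mem' pvFive _ _ _ hstep
  rw [hfold]
  rw [pv_items_loop pvFive PySem.Dict.empty (pvGrp md) (by decide) (by intro n _; simp)]
  show PySem.Dict.empty.items ++ _ = pvC md
  rw [show (PySem.Dict.empty : PySem.Dict String Int).items = [] from rfl]
  simp [pvC]

-- A's sorted items are also the canonical result
lemma pv_C_pairwise_fst (md : List (String × Int)) :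
    (pvC md).Pairwise (fun a b => a.1 < b.1) := by
  unfold pvC
  rw [List.pairwise_map]
  have hsub : (pvFive.filter (fun n => decide (pvGrp md n ≠ []))).Sublist pvFive :=
    List.filter_sublist
  have hpf : pvFive.Pairwise (fun a b : String => a < b) := by
    simp [pvFive, List.pairwise_cons]
    decide
  exact List.Pairwise.sublist hsub hpf

lemma pv_a_eq_C (md : List (String × Int)) :
    build_method_clusters_py md = pvC md := by
  unfold build_method_clusters_py
  rw [pv_stepA_eq]
  apply pv_sorted2_eq
  · -- pvC md is a permutation of the items
    have hkeys : (md.foldl pvStepT PySem.Dict.empty).items.map (fun p => p.1)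
        = (md.foldl pvStepT PySem.Dict.empty).keys := rfl
    have hnditems : (md.foldl pvStepT PySem.Dict.empty).items.Nodup :=
      List.Nodup.of_map (fun p => p.1) (hkeys ▸ pv_keys_nodup md)
    have hndC : (pvC md).Nodup :=
      (pv_C_pairwise_fst md).imp (fun {a b} h => fun he => absurd (he ▸ h) (lt_irrefl _))
    rw [List.perm_ext_iff_of_nodup hndC hnditems]
    rintro ⟨k, v⟩
    have hmem : ((k, v) ∈ (md.foldl pvStepT PySem.Dict.empty).items)
        ↔ (md.foldl pvStepT PySem.Dict.empty).get? k = some v :=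
      ⟨fun hm => PySem.Dict.get?_of_mem_items _ hm (pv_keys_nodup md),
       fun hg => PySem.Dict.mem_items_of_get?_eq_some _ hg⟩
    rw [hmem, pv_get?_fold]
    unfold pvC
    rw [List.mem_map]
    constructor
    · rintro ⟨n, hn, he⟩
      obtain ⟨rfl, rfl⟩ : n = k ∧ (pvGrp md n).sum = v :=
        ⟨congrArg Prod.fst he, congrArg Prod.snd he⟩
      rw [List.mem_filter] at hn
      simp only [decide_eq_true_eq] at hn
      rw [if_neg hn.2]
    · intro h
      by_cases h0 : pvGrp md k = []
      · rw [if_pos h0] at h; exact absurd h (by simp)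
      · rw [if_neg h0] at h
        obtain rfl : (pvGrp md k).sum = v := Option.some_injective _ h
        refine ⟨k, ?_, rfl⟩
        rw [List.mem_filter]
        refine ⟨?_, decide_eq_true h0⟩
        -- k is a target of some method, hence one of the five names
        have hne : md.filter (fun p => pvTargetOf p.1 == k) ≠ [] := by
          intro he
          exact h0 (by simp [pvGrp, he])
        rcases List.exists_mem_of_ne_nil _ hne with ⟨p, hp⟩
        have hfp := (List.mem_filter.mp hp).2
        have hk : pvTargetOf p.1 = k := by simpa using hfp
        exact hk ▸ pv_target_mem p.1
  · -- pvC md is pairwise nondecreasing in the tuple order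
    refine (pv_C_pairwise_fst md).imp ?_
    intro a b h
    rw [pvLe, pvLexLt_false_iff]
    exact ⟨lt_asymm h, Or.inl h⟩

-- ===== VERDICT (by name: the statement is the Claim_ definition above) =====
theorem build_method_clusters_py_spec : Claim_equal_build_method_clusters_py := by
  intro md _
  unfold Spec_build_method_clusters_py
  rw [pv_a_eq_C, pv_alt_eq_C]
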